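-- pv_equiv track=rewrite | github.com/whackamadoodle3000/gorilla | berkeley-function-call-leaderboard/bfcl_eval/ace/utils.py | flatten_unique
-- ===== SOURCE A (Python) =====
-- from typing import Iterable, Mapping, Sequence
--
-- def flatten_unique(items: Iterable[Iterable[str]]) -> list[str]:
--     seen: set[str] = set()
--     ordered: list[str] = []
--     for group in items:
--         for value in group:
--             if value not in seen:
--                 seen.add(value)
--                 ordered.append(value)
--     return ordered
-- ===== SOURCE B (Python) =====
-- from typing import Iterable
--
-- def flatten_unique(items: Iterable[Iterable[str]]) -> list[str]:
--     # Stage 1: flatten everything into one list.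
--     flat = [value for group in items for value in group]
--     # Stage 2: repeatedly take the first remaining value and filter out
--     # all of its later occurrences -- no auxiliary seen-set is kept.
--     ordered: list[str] = []
--     while flat:
--         head = flat[0]
--         ordered.append(head)
--         flat = [x for x in flat[1:] if x != head]
--     return ordered
-- ===== Notes on version B (the rewrite author's own statement) =====
-- stated objective: alternative
-- what changed: B first flattens all groups into one list, then deduplicates by repeatedly emitting the first remaining element and filtering out all of its later occurrences, instead of A's single interleaved pass with a seen-set; no hash structure is maintained.
import Mathlib
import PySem

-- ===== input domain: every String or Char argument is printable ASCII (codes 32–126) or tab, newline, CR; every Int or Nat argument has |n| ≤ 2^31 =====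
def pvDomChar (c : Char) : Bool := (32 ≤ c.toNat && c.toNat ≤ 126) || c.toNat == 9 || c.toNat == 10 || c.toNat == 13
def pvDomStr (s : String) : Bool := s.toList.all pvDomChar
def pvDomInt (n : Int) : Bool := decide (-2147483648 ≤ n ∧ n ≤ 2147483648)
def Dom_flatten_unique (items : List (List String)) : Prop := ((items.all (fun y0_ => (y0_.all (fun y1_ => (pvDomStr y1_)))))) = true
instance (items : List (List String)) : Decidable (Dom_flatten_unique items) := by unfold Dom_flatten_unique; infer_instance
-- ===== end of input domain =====

-- B flattens all groups into one list first, then deduplicates by repeatedly emitting the first remaining element and filtering out its later occurrences (no seen-set); objective: alternative.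


-- ===== PORT A =====
-- seen is a Python set, ordered a list; the two nested for-loops become two nested foldl over the pair state.
def flatten_unique (items : List (List String)) : List String :=
  (items.foldl
    (fun (st : PySem.Set String × List String) group =>
      group.foldl
        (fun st value =>
          if PySem.Set.contains st.1 value then st
          else (PySem.Set.add st.1 value, st.2 ++ [value]))
        st)
    (PySem.Set.empty, [])).2

-- ===== PORT B =====
-- the while-loop of Source B: emit the first remaining value, filter out its later occurrences.
def flatten_unique_dedup : List String → List String
  | [] => []
  | head :: rest => head :: flatten_unique_dedup (rest.filter (fun x => x != head))
termination_by xs => xs.length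
decreasing_by
  calc (List.filter _ rest.attach).unattach.length ≤ rest.attach.length := by
        rw [List.length_unattach]; exact List.length_filter_le _ _
    _ = rest.length := List.length_attach
    _ < (head :: rest).length := by simp

-- [value for group in items for value in group], then the dedup loop.
def flatten_unique_alt (items : List (List String)) : List String :=
  flatten_unique_dedup (items.flatMap (fun group => group))

-- ===== PRECONDITION & SPEC =====
def Spec_flatten_unique (items : List (List String)) (out : List String) : Prop := out = flatten_unique_alt items
instance (items : List (List String)) (out : List String) : Decidable (Spec_flatten_unique items out) := by unfold Spec_flatten_unique; infer_instance

-- ===== CLAIM (what is proved, stated in full; the proofs are below) =====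
def Claim_equal_flatten_unique : Prop := ∀ (items : List (List String)), Dom_flatten_unique items → Spec_flatten_unique items (flatten_unique items)

-- ===== LEMMAS AND PROOFS =====

-- unfolding equations for the well-founded flatten_unique_dedup
theorem flatten_unique_dedup_nil : flatten_unique_dedup [] = [] := by
  rw [flatten_unique_dedup.eq_def]

theorem flatten_unique_dedup_cons (x : String) (xs : List String) :
    flatten_unique_dedup (x :: xs)
      = x :: flatten_unique_dedup (xs.filter (fun y => y != x)) := by
  rw [flatten_unique_dedup.eq_def]

-- One group's pass of A's inner loop: both components of the state move by Set.add-folding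
-- the group, provided they start out equal.
theorem flatten_unique_inner (xs : List String) (s : List String) :
    xs.foldl
      (fun (st : PySem.Set String × List String) value =>
        if PySem.Set.contains st.1 value then st
        else (PySem.Set.add st.1 value, st.2 ++ [value]))
      (s, s)
    = (xs.foldl PySem.Set.add s, xs.foldl PySem.Set.add s) := by
  induction xs generalizing s with
  | nil => rfl
  | cons v xs ih =>
    simp only [List.foldl_cons]
    by_cases h : PySem.Set.contains s v
    · have hadd : PySem.Set.add s v = s := by
        simp only [PySem.Set.add, if_pos h]
      rw [if_pos h, hadd, ih]
    · have hadd : PySem.Set.add s v = s ++ [v] := by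
        simp only [PySem.Set.add, if_neg h]
      rw [if_neg h, ← hadd, ih]

theorem flatten_unique_outer (items : List (List String)) (s : List String) :
    items.foldl
      (fun (st : PySem.Set String × List String) group =>
        group.foldl
          (fun st value =>
            if PySem.Set.contains st.1 value then st
            else (PySem.Set.add st.1 value, st.2 ++ [value]))
          st)
      (s, s)
    = (items.foldl (fun s g => g.foldl PySem.Set.add s) s,
       items.foldl (fun s g => g.foldl PySem.Set.add s) s) := by
  induction items generalizing s with
  | nil => rfl
  | cons g items ih =>
    simp only [List.foldl_cons]
    rw [flatten_unique_inner, ih]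

-- Characterisation of the Set.add fold by B's filter-based dedup: folding xs into the
-- accumulated set s appends exactly B's dedup of the not-yet-seen elements of xs.
theorem flatten_unique_fold_dedup (xs : List String) (s : List String) :
    xs.foldl PySem.Set.add s
      = s ++ flatten_unique_dedup (xs.filter (fun y => !(PySem.Set.contains s y))) := by
  induction xs generalizing s with
  | nil => simp [flatten_unique_dedup_nil]
  | cons x xs ih =>
    simp only [List.foldl_cons, List.filter_cons]
    by_cases h : PySem.Set.contains s x
    · have hadd : PySem.Set.add s x = s := by
        simp only [PySem.Set.add, if_pos h]
      rw [hadd, ih, h]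
      simp
    · have hadd : PySem.Set.add s x = s ++ [x] := by
        simp only [PySem.Set.add, if_neg h]
      have hb : PySem.Set.contains s x = false := Bool.eq_false_iff.mpr h
      rw [hadd, ih, hb]
      simp only [Bool.not_false, if_true]
      rw [flatten_unique_dedup_cons, List.append_assoc, List.singleton_append]
      congr 2
      rw [List.filter_filter]
      congr 1
      apply List.filter_congr
      intro y _hy
      simp only [PySem.Set.contains, bne]
      by_cases hyx : y = x <;> by_cases hys : y ∈ s <;> simp [hyx, hys]

-- With nothing seen yet the filter keeps everything.
theorem flatten_unique_filter_empty (l : List String) :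
    l.filter (fun y => !(PySem.Set.contains ([] : List String) y)) = l := by
  simp [PySem.Set.contains]

-- ===== VERDICT (by name: the statement is the Claim_ definition above) =====
theorem flatten_unique_spec : Claim_equal_flatten_unique := by
  intro items _
  show flatten_unique items = flatten_unique_alt items
  unfold flatten_unique flatten_unique_alt
  rw [show (PySem.Set.empty : PySem.Set String) = ([] : List String) from rfl,
      flatten_unique_outer, ← List.foldl_flatten, flatten_unique_fold_dedup,
      flatten_unique_filter_empty, List.nil_append,
      show items.flatMap (fun group => group) = items.flatten by simp [List.flatMap_def]]
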